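-- pv_equiv track=rewrite | github.com/kywoo26/snowiki | snowiki/compiler/provenance_links.py | dedupe_raw_refs
-- ===== SOURCE A (Python) =====
-- from collections.abc import Iterable, Mapping
-- from typing import Any
--
-- def dedupe_raw_refs(raw_refs: Iterable[Mapping[str, Any]]) -> list[dict[str, Any]]:
--     deduped: list[dict[str, Any]] = []
--     seen: set[tuple[str, str]] = set()
--     for raw_ref in raw_refs:
--         entry = dict(raw_ref)
--         key = (str(entry.get("sha256", "")), str(entry.get("path", "")))
--         if key in seen:
--             continue
--         seen.add(key)
--         deduped.append(entry)
--     deduped.sort(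
--         key=lambda entry: (str(entry.get("path", "")), str(entry.get("sha256", "")))
--     )
--     return deduped
-- ===== SOURCE B (Python) =====
-- def dedupe_raw_refs(raw_refs):
--     entries = [dict(r) for r in raw_refs]
--     entries.sort(key=lambda e: (str(e.get("path", "")), str(e.get("sha256", ""))))
--     kept = []
--     prev_key = None
--     for entry in entries:
--         key = (str(entry.get("sha256", "")), str(entry.get("path", "")))
--         if key != prev_key:
--             kept.append(entry)
--             prev_key = key
--     return kept
-- ===== Notes on version B (the rewrite author's own statement) =====
-- stated objective: alternative
-- what changed: Replaces the seen-set first-occurrence dedupe followed by a final sort with a stable sort of all entries first and a single linear sweep that drops entries whose (sha256, path) key equals the previously kept key.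
import Mathlib
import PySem

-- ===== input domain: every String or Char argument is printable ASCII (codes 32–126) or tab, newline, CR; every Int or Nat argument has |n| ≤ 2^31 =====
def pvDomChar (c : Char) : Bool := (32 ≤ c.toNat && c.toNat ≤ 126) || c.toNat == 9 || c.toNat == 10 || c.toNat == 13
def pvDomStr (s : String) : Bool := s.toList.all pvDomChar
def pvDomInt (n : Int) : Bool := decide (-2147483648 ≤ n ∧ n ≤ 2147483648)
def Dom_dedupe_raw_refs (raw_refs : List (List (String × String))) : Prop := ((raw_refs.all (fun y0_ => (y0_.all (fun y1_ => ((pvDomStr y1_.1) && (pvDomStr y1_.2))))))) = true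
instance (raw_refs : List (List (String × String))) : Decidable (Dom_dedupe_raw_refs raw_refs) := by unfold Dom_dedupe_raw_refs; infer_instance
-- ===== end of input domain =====

-- B replaces the seen-set dedupe-then-sort of A with a stable sort followed by a single
-- linear sweep dropping entries whose key repeats the previously kept key (alternative algorithm, same cost).


-- ===== PORT A =====
def dedupe_raw_refs (raw_refs : List (List (String × String))) : List (List (String × String)) :=
  let st := raw_refs.foldl
    (fun (st : List (PySem.Dict String String) × PySem.Set (String × String)) raw_ref =>
      let entry := PySem.Dict.ofList raw_ref
      let key := (entry.getD "sha256" "", entry.getD "path" "")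
      if st.2.contains key then st else (st.1 ++ [entry], st.2.add key))
    ([], PySem.Set.empty)
  (PySem.List.sorted2 st.1
      (fun entry => entry.getD "path" "") (fun entry => entry.getD "sha256" "")).map
    PySem.Dict.items

-- ===== PORT B =====
def dedupe_raw_refs_alt (raw_refs : List (List (String × String))) : List (List (String × String)) :=
  let entries := raw_refs.map PySem.Dict.ofList
  let sortedEntries := PySem.List.sorted2 entries
      (fun e => e.getD "path" "") (fun e => e.getD "sha256" "")
  let st := sortedEntries.foldl
    (fun (st : List (PySem.Dict String String) × Option (String × String)) entry =>
      let key := (entry.getD "sha256" "", entry.getD "path" "")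
      if st.2 ≠ some key then (st.1 ++ [entry], some key) else st)
    ([], none)
  st.1.map PySem.Dict.items

-- ===== PRECONDITION & SPEC =====
def Spec_dedupe_raw_refs (raw_refs : List (List (String × String))) (out : List (List (String × String))) : Prop := out = dedupe_raw_refs_alt raw_refs
instance (raw_refs : List (List (String × String))) (out : List (List (String × String))) : Decidable (Spec_dedupe_raw_refs raw_refs out) := by unfold Spec_dedupe_raw_refs; infer_instance

-- ===== CLAIM (what is proved, stated in full; the proofs are below) =====
def Claim_equal_dedupe_raw_refs : Prop := ∀ (raw_refs : List (List (String × String))), Dom_dedupe_raw_refs raw_refs → Spec_dedupe_raw_refs raw_refs (dedupe_raw_refs raw_refs)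

-- ===== LEMMAS AND PROOFS =====

-- the dedupe key (sha256, path), the sort key (path, sha256) as a lexicographic pair, and their correspondence
def pvDk (e : PySem.Dict String String) : String × String := (e.getD "sha256" "", e.getD "path" "")
def pvSkk (k : String × String) : Lex (String × String) := toLex (k.2, k.1)
def pvSk (e : PySem.Dict String String) : Lex (String × String) := pvSkk (pvDk e)

lemma pvSkk_inj {a b : String × String} (h : pvSkk a = pvSkk b) : a = b := by
  unfold pvSkk at h
  have := congrArg ofLex h
  simp at this
  exact Prod.ext this.2 this.1

-- first-occurrence dedupe by pvDk, the common spine of both ports' loops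
def pvDedup (seen : List (String × String)) :
    List (PySem.Dict String String) → List (PySem.Dict String String)
  | [] => []
  | e :: t => if pvDk e ∈ seen then pvDedup seen t else e :: pvDedup (pvDk e :: seen) t

lemma pvDedup_congr {s s' : List (String × String)} (h : ∀ k, k ∈ s ↔ k ∈ s')
    (l : List (PySem.Dict String String)) : pvDedup s l = pvDedup s' l := by
  induction l generalizing s s' with
  | nil => rfl
  | cons e t ih =>
    by_cases he : pvDk e ∈ s
    · rw [pvDedup, pvDedup, if_pos he, if_pos ((h _).mp he), ih h]
    · rw [pvDedup, pvDedup, if_neg he, if_neg (fun hc => he ((h _).mpr hc))]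
      refine congrArg _ (ih ?_)
      intro k; simp [h k]

lemma sorted2_eq_sorted {α : Type} (xs : List α) (k1 k2 : α → String) :
    PySem.List.sorted2 xs k1 k2 = PySem.List.sorted xs (fun e => toLex (k1 e, k2 e)) := by
  rw [PySem.List.sorted_eq_foldl_insertBy, PySem.List.sorted2]
  simp only
  congr 1
  funext acc x
  congr 1
  funext a b
  rcases lt_trichotomy (k1 a) (k1 b) with h | h | h
  · simp [Prod.Lex.lt_iff, h]
  · simp [Prod.Lex.lt_iff, h]
  · simp only [Prod.Lex.lt_iff, ofLex_toLex]
    have h1 : ¬ k1 a < k1 b := not_lt.mpr h.le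
    have h2 : k1 a ≠ k1 b := ne_of_gt h
    simp [h, h1, h2]

-- A's loop computes pvDedup
lemma afold_eq (l : List (PySem.Dict String String))
    (acc : List (PySem.Dict String String)) (s : PySem.Set (String × String)) :
    (l.foldl
      (fun (st : List (PySem.Dict String String) × PySem.Set (String × String)) e =>
        if st.2.contains (pvDk e) then st else (st.1 ++ [e], st.2.add (pvDk e)))
      (acc, s)).1 = acc ++ pvDedup s l := by
  induction l generalizing acc s with
  | nil => simp [pvDedup]
  | cons e t ih =>
    rw [List.foldl_cons]
    by_cases he : pvDk e ∈ s
    · have hc : s.contains (pvDk e) = true := by simpa using he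
      rw [pvDedup, if_pos he]
      simp only [hc, if_true]
      exact ih acc s
    · have hc : s.contains (pvDk e) = false := by simpa using he
      rw [pvDedup, if_neg he]
      simp only [hc, Bool.false_eq_true, if_false]
      rw [ih (acc ++ [e]) (s.add (pvDk e)), List.append_assoc]
      refine congrArg _ (congrArg _ (pvDedup_congr (fun k => ?_) t))
      rw [PySem.Set.add, if_neg (by simpa using he)]
      simp [or_comm]

-- B's sweep computes pvDedup on a sorted list
lemma bfold_eq (l : List (PySem.Dict String String))
    (acc : List (PySem.Dict String String)) (prev : Option (String × String))
    (seen : List (String × String))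
    (hsort : l.Pairwise (fun a b => pvSk a ≤ pvSk b))
    (h1 : ∀ x ∈ l, pvDk x ∈ seen → prev = some (pvDk x))
    (h2 : ∀ k, prev = some k → k ∈ seen)
    (h3 : ∀ x ∈ l, ∀ k, prev = some k → pvSkk k ≤ pvSk x) :
    (l.foldl
      (fun (st : List (PySem.Dict String String) × Option (String × String)) e =>
        if st.2 ≠ some (pvDk e) then (st.1 ++ [e], some (pvDk e)) else st)
      (acc, prev)).1 = acc ++ pvDedup seen l := by
  induction l generalizing acc prev seen with
  | nil => simp [pvDedup]
  | cons e t ih =>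
    obtain ⟨hhead, htail⟩ := List.pairwise_cons.mp hsort
    rw [List.foldl_cons]
    by_cases hp : prev = some (pvDk e)
    · have hin : pvDk e ∈ seen := h2 _ hp
      rw [pvDedup, if_pos hin, if_neg (not_not_intro hp)]
      exact ih acc prev seen htail (fun x hx => h1 x (List.mem_cons_of_mem _ hx)) h2
        (fun x hx => h3 x (List.mem_cons_of_mem _ hx))
    · have hnin : pvDk e ∉ seen := fun hc => hp (h1 e List.mem_cons_self hc)
      rw [pvDedup, if_neg hnin, if_pos hp]
      rw [ih (acc ++ [e]) (some (pvDk e)) (pvDk e :: seen) htail ?_ ?_ ?_, List.append_assoc,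
        List.singleton_append]
      · intro x hx hxin
        rcases List.mem_cons.mp hxin with h | h
        · rw [h]
        · exfalso
          have hpx : prev = some (pvDk x) := h1 x (List.mem_cons_of_mem _ hx) h
          have hle : pvSk x ≤ pvSk e := h3 e List.mem_cons_self _ hpx
          have hge : pvSk e ≤ pvSk x := hhead x hx
          exact hp (hpx.trans (congrArg some (pvSkk_inj (le_antisymm hge hle)).symm))
      · intro k hk
        rw [Option.some_inj.mp hk]
        exact List.mem_cons_self
      · intro x hx k hk
        rw [← Option.some_inj.mp hk]
        exact hhead x hx

lemma pvDedup_sublist (seen : List (String × String)) (l : List (PySem.Dict String String)) :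
    (pvDedup seen l).Sublist l := by
  induction l generalizing seen with
  | nil => simp [pvDedup]
  | cons e t ih =>
    rw [pvDedup]
    split
    · exact (ih seen).cons e
    · exact (ih _).cons₂ e

lemma pvDedup_dk_notin (seen : List (String × String)) (l : List (PySem.Dict String String)) :
    ∀ e ∈ pvDedup seen l, pvDk e ∉ seen := by
  induction l generalizing seen with
  | nil => simp [pvDedup]
  | cons x t ih =>
    intro e he
    rw [pvDedup] at he
    split at he
    · exact ih seen e he
    · rcases List.mem_cons.mp he with he | he
      · subst he; assumption
      · exact fun hc => ih _ e he (List.mem_cons_of_mem _ hc)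

lemma pvDedup_pairwise_dk (seen : List (String × String)) (l : List (PySem.Dict String String)) :
    (pvDedup seen l).Pairwise (fun a b => pvDk a ≠ pvDk b) := by
  induction l generalizing seen with
  | nil => simp [pvDedup]
  | cons x t ih =>
    rw [pvDedup]
    split
    · exact ih seen
    · refine List.Pairwise.cons ?_ (ih _)
      intro b hb hc
      exact pvDedup_dk_notin _ _ b hb (hc ▸ List.mem_cons_self)

lemma mem_pvDedup (e : PySem.Dict String String) (seen : List (String × String))
    (l : List (PySem.Dict String String)) :
    e ∈ pvDedup seen l ↔ pvDk e ∉ seen ∧ l.find? (fun x => pvDk x == pvDk e) = some e := by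
  induction l generalizing seen with
  | nil => simp [pvDedup]
  | cons x t ih =>
    rw [pvDedup]
    by_cases hx : pvDk x ∈ seen
    · rw [if_pos hx]
      by_cases hk : pvDk x = pvDk e
      · have hin : pvDk e ∈ seen := hk ▸ hx
        rw [List.find?_cons_of_pos (by simp [hk]), ih]
        simp [hin]
      · rw [List.find?_cons_of_neg (by simp [hk]), ih]
    · rw [if_neg hx]
      by_cases hk : pvDk x = pvDk e
      · have hin : pvDk e ∈ pvDk x :: seen := by simp [hk.symm]
        rw [List.find?_cons_of_pos (by simp [hk])]
        have hnin : pvDk e ∉ seen := hk ▸ hx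
        simp [List.mem_cons, ih, hin, hnin, eq_comm]
      · have hne : e ≠ x := fun h => hk (by rw [h])
        rw [List.find?_cons_of_neg (by simp [hk]), List.mem_cons, ih]
        simp [hne]
        exact fun _ _ h => hk h.symm

lemma filter_insertBy (x : PySem.Dict String String) (acc : List (PySem.Dict String String))
    (v : Lex (String × String)) (hs : acc.Pairwise (fun a b => pvSk a ≤ pvSk b)) :
    (PySem.List.insertBy (fun a b => decide (pvSk a < pvSk b)) x acc).filter
        (fun y => pvSk y == v)
      = acc.filter (fun y => pvSk y == v) ++ if pvSk x == v then [x] else [] := by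
  induction acc with
  | nil =>
    by_cases hv : pvSk x = v <;> simp [PySem.List.insertBy, hv]
  | cons y ys ih =>
    obtain ⟨hhead, htail⟩ := List.pairwise_cons.mp hs
    rw [PySem.List.insertBy]
    by_cases hlt : pvSk x < pvSk y
    · rw [if_pos (by simpa using hlt)]
      have hnil : ∀ z ∈ y :: ys, ¬ pvSk z = v ∨ ¬ pvSk x = v := by
        intro z hz
        by_cases hv : pvSk x = v
        · left
          intro hzv
          rcases List.mem_cons.mp hz with h | h
          · subst h; exact absurd (hv.trans hzv.symm) (ne_of_lt hlt)
          · exact absurd (hv.trans hzv.symm) (ne_of_lt (lt_of_lt_of_le hlt (hhead z h)))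
        · right; exact hv
      by_cases hv : pvSk x = v
      · have hz : ∀ z ∈ y :: ys, ¬ (pvSk z == v) = true := by
          intro z hz
          rcases hnil z hz with h | h
          · simp [h]
          · exact absurd hv h
        rw [List.filter_cons_of_pos (by simp [hv]), List.filter_eq_nil_iff.mpr hz, if_pos (by simp [hv])]
        simp
      · rw [List.filter_cons_of_neg (by simp [hv]), if_neg (by simp [hv])]
        simp
    · rw [if_neg (by simpa using hlt)]
      rw [List.filter_cons, List.filter_cons, ih htail]
      split <;> simp

lemma filter_sorted (xs : List (PySem.Dict String String)) (v : Lex (String × String)) :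
    (PySem.List.sorted xs pvSk).filter (fun y => pvSk y == v) = xs.filter (fun y => pvSk y == v) := by
  rw [PySem.List.sorted_eq_foldl_insertBy]
  have main : ∀ (l : List (PySem.Dict String String)) (acc : List (PySem.Dict String String)),
      acc.Pairwise (fun a b => pvSk a ≤ pvSk b) →
      (l.foldl (fun acc x => PySem.List.insertBy (fun a b => decide (pvSk a < pvSk b)) x acc)
          acc).filter (fun y => pvSk y == v)
        = acc.filter (fun y => pvSk y == v) ++ l.filter (fun y => pvSk y == v) := by
    intro l
    induction l with
    | nil => simp
    | cons x t ih =>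
      intro acc hacc
      rw [List.foldl_cons, ih _ (PySem.List.insertBy_pairwise_le pvSk x acc hacc),
        filter_insertBy x acc v hacc, List.filter_cons, List.append_assoc]
      split <;> simp
  simpa using main xs [] List.Pairwise.nil

lemma find?_sorted (xs : List (PySem.Dict String String)) (k : String × String) :
    (PySem.List.sorted xs pvSk).find? (fun x => pvDk x == k) = xs.find? (fun x => pvDk x == k) := by
  have hp : (fun x => pvDk x == k) = (fun x => pvSk x == pvSkk k) := by
    funext x
    by_cases h : pvDk x = k
    · simp [pvSk, h]
    · have h2 : pvSk x ≠ pvSkk k := fun hc => h (pvSkk_inj hc)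
      simp [h, h2]
  rw [← List.head?_filter, ← List.head?_filter, hp, filter_sorted]

lemma sorted_pvDedup (xs : List (PySem.Dict String String)) :
    PySem.List.sorted (pvDedup [] xs) pvSk = pvDedup [] (PySem.List.sorted xs pvSk) := by
  have hnd : ∀ (l : List (PySem.Dict String String)), (pvDedup [] l).Nodup :=
    fun l => (pvDedup_pairwise_dk [] l).imp (fun hab heq => hab (congrArg pvDk heq))
  apply PySem.List.sorted_eq_of_perm_of_pairwise_lt
  · rw [List.perm_ext_iff_of_nodup (hnd _) (hnd _)]
    intro e
    rw [mem_pvDedup, mem_pvDedup, find?_sorted]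
  · have h1 : (pvDedup [] (PySem.List.sorted xs pvSk)).Pairwise (fun a b => pvSk a ≤ pvSk b) :=
      List.Pairwise.sublist (pvDedup_sublist [] _) (PySem.List.sorted_pairwise xs pvSk)
    have h2 := pvDedup_pairwise_dk [] (PySem.List.sorted xs pvSk)
    refine (h1.and h2).imp ?_
    rintro a b ⟨hle, hne⟩
    exact lt_of_le_of_ne hle (fun hc => hne (pvSkk_inj hc))

-- ===== VERDICT (by name: the statement is the Claim_ definition above) =====
theorem dedupe_raw_refs_spec : Claim_equal_dedupe_raw_refs := by
  intro raw_refs _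
  unfold Spec_dedupe_raw_refs dedupe_raw_refs dedupe_raw_refs_alt
  have hfold : (raw_refs.foldl
      (fun (st : List (PySem.Dict String String) × PySem.Set (String × String)) raw_ref =>
        let entry := PySem.Dict.ofList raw_ref
        let key := (entry.getD "sha256" "", entry.getD "path" "")
        if st.2.contains key then st else (st.1 ++ [entry], st.2.add key))
      ([], PySem.Set.empty))
      = ((raw_refs.map PySem.Dict.ofList).foldl
      (fun (st : List (PySem.Dict String String) × PySem.Set (String × String)) e =>
        if st.2.contains (pvDk e) then st else (st.1 ++ [e], st.2.add (pvDk e)))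
      ([], PySem.Set.empty)) := (List.foldl_map (f := PySem.Dict.ofList)
        (g := fun (st : List (PySem.Dict String String) × PySem.Set (String × String)) e =>
          if st.2.contains (pvDk e) then st else (st.1 ++ [e], st.2.add (pvDk e)))
        (l := raw_refs) (init := ([], PySem.Set.empty))).symm
  have hkey : (fun (e : PySem.Dict String String) =>
      toLex (e.getD "path" "", e.getD "sha256" "")) = pvSk := rfl
  simp only [hfold, sorted2_eq_sorted, hkey]
  rw [show (([] : List (PySem.Dict String String)), (PySem.Set.empty : PySem.Set (String × String)))
        = (([] : List (PySem.Dict String String)), ([] : List (String × String))) from rfl,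
    afold_eq, List.nil_append]
  have hb : ((PySem.List.sorted (raw_refs.map PySem.Dict.ofList) pvSk).foldl
      (fun (st : List (PySem.Dict String String) × Option (String × String)) entry =>
        let key := (entry.getD "sha256" "", entry.getD "path" "")
        if st.2 ≠ some key then (st.1 ++ [entry], some key) else st)
      ([], none)).1
      = [] ++ pvDedup [] (PySem.List.sorted (raw_refs.map PySem.Dict.ofList) pvSk) := by
    exact bfold_eq _ [] none [] (PySem.List.sorted_pairwise _ pvSk)
      (by intro x _ h; simp at h) (by intro k hk; simp at hk) (by intro x _ k hk; simp at hk)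
  simp only [hb, List.nil_append, sorted_pvDedup]
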